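-- pv_equiv track=rewrite | github.com/mohammadfaiizan/ProjectI | DSA/Problem/Trie/07_Competitive_Programming/Contest_String_Problems.py | lexicographically_smallest_string
-- ===== SOURCE A (Python) =====
-- from typing import List, Dict, Set, Tuple, Optional
--
-- class TrieNode:
--     def __init__(self):
--         self.children = {}
--         self.is_end = False
--         self.count = 0
--         self.indices = []
--
-- def lexicographically_smallest_string(words: List[str], k: int) -> str:
--     """
--     Approach 5: Lexicographically Smallest String
--
--     Find lexicographically smallest string after k operations.
--
--     Time: O(n * m * k) where n=words, m=avg_length
--     Space: O(n * m)
--     """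
--     def build_suffix_trie(word: str) -> TrieNode:
--         root = TrieNode()
--
--         for i in range(len(word)):
--             node = root
--             for j in range(i, len(word)):
--                 char = word[j]
--                 if char not in node.children:
--                     node.children[char] = TrieNode()
--                 node = node.children[char]
--                 node.indices.append(i)
--             node.is_end = True
--
--         return root
--
--     def find_smallest_suffix(trie_root: TrieNode, remaining_ops: int) -> str:
--         if remaining_ops == 0 or not trie_root.children:
--             return ""
--
--         # Find smallest character
--         min_char = min(trie_root.children.keys())
--         node = trie_root.children[min_char]
--
--         # Recursively build the rest
--         rest = find_smallest_suffix(node, remaining_ops - 1)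
--         return min_char + rest
--
--     # Build tries for all words
--     tries = []
--     for word in words:
--         trie = build_suffix_trie(word)
--         tries.append(trie)
--
--     # Find globally smallest string
--     result = ""
--     remaining_k = k
--
--     while remaining_k > 0 and tries:
--         min_char = 'z' + '1'  # Larger than any possible character
--         best_trie_idx = -1
--
--         # Find minimum first character among all tries
--         for i, trie in enumerate(tries):
--             if trie.children:
--                 first_char = min(trie.children.keys())
--                 if first_char < min_char:
--                     min_char = first_char
--                     best_trie_idx = i
--
--         if best_trie_idx == -1:
--             break
--
--         result += min_char
--         remaining_k -= 1
--
--         # Move to next level in the best trie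
--         tries[best_trie_idx] = tries[best_trie_idx].children[min_char]
--
--     return result
-- ===== SOURCE B (Python) =====
-- def lexicographically_smallest_string(words, k):
--     # Lazy position lists instead of building O(m^2)-node suffix tries: each word's
--     # current trie node is represented by the list of positions where the next
--     # character of the descended path can be read, plus that word's cached minimal
--     # next character, so a greedy step scans one cached char per word.
--     states = []
--     for w in words:
--         ps = list(range(len(w)))
--         states.append((w, ps, min((w[p] for p in ps), default=None)))
--     out = []
--     remaining = k
--     while remaining > 0 and states:
--         best = None  # (smallest available character, index of its word)
--         for i, (w, ps, mc) in enumerate(states):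
--             if mc is not None and (best is None or mc < best[0]):
--                 best = (mc, i)
--         if best is None:
--             break
--         c, bi = best
--         w, ps, _ = states[bi]
--         nps = [p + 1 for p in ps if w[p] == c and p + 1 < len(w)]
--         states[bi] = (w, nps, min((w[p] for p in nps), default=None))
--         out.append(c)
--         remaining -= 1
--     return "".join(out)
-- ===== Notes on version B (the rewrite author's own statement) =====
-- stated objective: faster
-- what changed: B never builds the O(m^2)-node suffix tries: each word's current trie node is represented lazily by the list of positions where the path's next character can be read, plus a cached per-word minimal next character, so a greedy step compares one cached char per word and re-filters only the chosen word's positions.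
-- outside the precondition, e.g. on lexicographically_smallest_string(['{'], 1): A returns '', B returns '{'; on lexicographically_smallest_string(['az{'], 5): A returns 'az', B returns 'az{'
import Mathlib
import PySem

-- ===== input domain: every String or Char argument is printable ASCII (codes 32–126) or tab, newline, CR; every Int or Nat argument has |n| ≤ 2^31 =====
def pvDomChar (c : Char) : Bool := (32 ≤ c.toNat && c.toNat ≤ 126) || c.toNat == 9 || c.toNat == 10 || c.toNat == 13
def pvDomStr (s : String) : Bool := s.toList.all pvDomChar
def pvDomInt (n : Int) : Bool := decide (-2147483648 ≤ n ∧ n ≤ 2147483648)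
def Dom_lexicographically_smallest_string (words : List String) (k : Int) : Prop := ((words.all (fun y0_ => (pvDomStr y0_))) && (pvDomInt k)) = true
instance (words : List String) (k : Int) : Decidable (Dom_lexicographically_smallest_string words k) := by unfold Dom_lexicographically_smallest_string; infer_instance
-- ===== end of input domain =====

-- B replaces A's O(m^2)-node suffix-trie construction by lazy position lists per word with a
-- cached per-word minimal next character (objective: faster — no trie build, O(n) selection scan).

-- ===== PORT A =====
-- TrieNode: children (insertion-ordered dict Char -> node, as an explicit child list,
-- since a dict of the node type inside itself is not expressible directly), is_end, indices.
mutual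
inductive ATrie : Type where
  | mk : Bool → List Int → AChildren → ATrie
inductive AChildren : Type where
  | nil : AChildren
  | cons : Char → ATrie → AChildren → AChildren
end

def aChildren : ATrie → AChildren
  | .mk _ _ ch => ch

-- dict lookup: first matching key
def aChildLookup : AChildren → Char → Option ATrie
  | .nil, _ => none
  | .cons c' t rest, c => if c' = c then some t else aChildLookup rest c

-- dict.keys() in insertion order
def aChildKeys : AChildren → List Char
  | .nil => []
  | .cons c _ rest => c :: aChildKeys rest

-- dict assignment: overwrite in place, new keys append at the end
def aSetChild : AChildren → Char → ATrie → AChildren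
  | .nil, c, t => .cons c t .nil
  | .cons c' t' rest, c, t => if c' = c then .cons c' t rest else .cons c' t' (aSetChild rest c t)

-- the inner 'for j in range(i, len(word))' walk of build_suffix_trie, as structural
-- recursion on the suffix word[i:]; 'node.is_end = True' at the end, 'indices.append(i)'
-- on every node entered.
-- node.indices.append(i)
def aAppendIndex : ATrie → Int → ATrie
  | .mk e ix ch, i => .mk e (ix ++ [i]) ch

def aInsertSuffix : ATrie → List Char → Int → ATrie
  | .mk _ idx ch, [], _ => .mk true idx ch
  | .mk e idx ch, c :: rest, i =>
      ATrie.mk e idx (aSetChild ch c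
        (aInsertSuffix (aAppendIndex ((aChildLookup ch c).getD (ATrie.mk false [] .nil)) i) rest i))

-- build_suffix_trie: for i in range(len(word)): insert word[i:]
def aBuild (w : String) : ATrie :=
  (PySem.List.pyRange 0 (PySem.Str.len w)).foldl
    (fun root i => aInsertSuffix root (w.toList.drop i.toNat) i)
    (ATrie.mk false [] .nil)

-- the 'for i, trie in enumerate(tries)' selection scan: state (min_char, best_trie_idx),
-- min_char starts as the string "z1"; 'if trie.children' and min(keys) merged in one match
-- (min? = none exactly when the children dict is empty).
def aScan : List ATrie → Int → List Char → Int → (List Char × Int)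
  | [], _, minC, best => (minC, best)
  | t :: rest, i, minC, best =>
    match PySem.List.min? (aChildKeys (aChildren t)) (fun c => c) with
    | none => aScan rest (i + 1) minC best
    | some fc =>
      if PySem.Chars.strLt [fc] minC then aScan rest (i + 1) [fc] i
      else aScan rest (i + 1) minC best

-- the 'while remaining_k > 0 and tries' loop; fuel = k.toNat (remaining_k decreases by 1
-- every iteration that does not break).
def aLoop : Nat → List ATrie → List Char → List Char
  | 0, _, acc => acc
  | fuel + 1, tries, acc =>
    if tries.isEmpty then acc
    else
      let (minC, best) := aScan tries 0 ['z', '1'] (-1)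
      if best = -1 then acc
      else
        match minC with
        | [] => acc  -- unreachable: best ≠ -1 only after min_char was set to a 1-char string
        | c :: _ =>
          -- tries[best_trie_idx] = tries[best_trie_idx].children[min_char]; the index is
          -- valid and the key present (it is the min of that trie's keys), so the defaults
          -- are never used (Python raises otherwise).
          let t := tries.getD best.toNat (ATrie.mk false [] .nil)
          let child := (aChildLookup (aChildren t) c).getD (ATrie.mk false [] .nil)
          aLoop fuel (tries.set best.toNat child) (acc ++ [c])

def lexicographically_smallest_string (words : List String) (k : Int) : String :=
  String.mk (aLoop k.toNat (words.map aBuild) [])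

-- ===== PORT B =====
-- w[p]; p is in range by construction (the default is never used; Python would raise).
def bCharAt (w : List Char) (p : Int) : Char :=
  (PySem.List.pyGet? w p).getD 'A'

-- min((w[p] for p in ps), default=None)
def bMinChar (w : List Char) (ps : List Int) : Option Char :=
  PySem.List.min? (ps.map (fun p => bCharAt w p)) (fun c => c)

-- [p + 1 for p in ps if w[p] == best_char and p + 1 < len(w)]
def bAdvance (w : List Char) (ps : List Int) (c : Char) : List Int :=
  (ps.filter (fun p => bCharAt w p == c && decide (p + 1 < (w.length : Int)))).map (fun p => p + 1)

-- 'for i, (w, ps, mc) in enumerate(states)': keep the best (char, word index) so far;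
-- 'if mc is not None and (best is None or mc < best[0]): best = (mc, i)'
def bScan : List (List Char × List Int × Option Char) → Int → Option (Char × Int) → Option (Char × Int)
  | [], _, best => best
  | (_, _, mc) :: rest, i, best =>
      bScan rest (i + 1)
        (match mc with
         | none => best
         | some m =>
           match best with
           | none => some (m, i)
           | some (bc, bi) => if m < bc then some (m, i) else some (bc, bi))

-- B's while-loop, fuel = k.toNat as for A
def bLoop : Nat → List (List Char × List Int × Option Char) → List Char → List Char
  | 0, _, acc => acc
  | fuel + 1, states, acc =>
    if states.isEmpty then acc
    else
      match bScan states 0 none with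
      | none => acc
      | some (c, bi) =>
        -- states[best_idx]: index valid by construction
        let (w, ps, _) := states.getD bi.toNat ([], [], none)
        let nps := bAdvance w ps c
        bLoop fuel (states.set bi.toNat (w, nps, bMinChar w nps)) (acc ++ [c])

def lexicographically_smallest_string_alt (words : List String) (k : Int) : String :=
  String.mk (bLoop k.toNat
    (words.map (fun w => (w.toList, PySem.List.pyRange 0 (PySem.Str.len w),
      bMinChar w.toList (PySem.List.pyRange 0 (PySem.Str.len w))))) [])

-- ===== PRECONDITION & SPEC =====
-- Pre_ restricts to the function's natural domain: words over characters ≤ 'z'.  A's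
-- selection sentinel is the string 'z1', so on a word containing one of '{', '|', '}', '~'
-- (the four printable characters above 'z') A silently truncates its result the moment such
-- a character becomes the minimal available one, while B extends the string there.
def Pre_lexicographically_smallest_string (words : List String) (k : Int) : Prop :=
  (words.all (fun w => w.toList.all (fun c => decide (c ≤ 'z')))) = true
instance (words : List String) (k : Int) : Decidable (Pre_lexicographically_smallest_string words k) := by unfold Pre_lexicographically_smallest_string; infer_instance
def pvWitness_lexicographically_smallest_string : List String × Int := (["bab", "ab"], 4)
def Spec_lexicographically_smallest_string (words : List String) (k : Int) (out : String) : Prop := out = lexicographically_smallest_string_alt words k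
instance (words : List String) (k : Int) (out : String) : Decidable (Spec_lexicographically_smallest_string words k out) := by unfold Spec_lexicographically_smallest_string; infer_instance

-- ===== CLAIM (what is proved, stated in full; the proofs are below) =====
def Claim_equal_lexicographically_smallest_string : Prop := ∀ (words : List String) (k : Int), Dom_lexicographically_smallest_string words k → Pre_lexicographically_smallest_string words k → Spec_lexicographically_smallest_string words k (lexicographically_smallest_string words k)

-- ===== LEMMAS AND PROOFS =====

-- all positions are valid indices into w
def wfPos (w : List Char) (ps : List Int) : Prop :=
  ∀ p ∈ ps, 0 ≤ p ∧ p < (w.length : Int)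

-- the simulation invariant: an A-side trie node t corresponds to B's position list ps over
-- word w: the node's child keys are exactly the characters readable at the positions, keys
-- are unique, positions are in range, and each child corresponds to the advanced positions.
mutual
def RelT : ATrie → List Char → List Int → Prop
  | .mk _ _ ch, w, ps =>
      (∀ c, c ∈ aChildKeys ch ↔ ∃ p ∈ ps, bCharAt w p = c) ∧
      (aChildKeys ch).Nodup ∧ wfPos w ps ∧ RelC ch w ps
def RelC : AChildren → List Char → List Int → Prop
  | .nil, _, _ => True
  | .cons c t rest, w, ps => RelT t w (bAdvance w ps c) ∧ RelC rest w ps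
end

-- B's running minimum over the characters at ps (the semantic value of bMinChar)
def minFoldFrom (w : List Char) (b : Char) : List Int → Char
  | [] => b
  | p :: pr => minFoldFrom w (if bCharAt w p < b then bCharAt w p else b) pr

def minFold (w : List Char) (ps : List Int) : Option Char :=
  match ps with
  | [] => none
  | p :: pr => some (minFoldFrom w (bCharAt w p) pr)

def ItemRel (t : ATrie) (s : List Char × List Int × Option Char) : Prop :=
  RelT t s.1 s.2.1 ∧ (∀ c ∈ s.1, c ≤ 'z') ∧ s.2.2 = minFold s.1 s.2.1

theorem lt_singleton_iff (a b : Char) : (([a] : List Char) < [b]) ↔ a < b := by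
  constructor
  · intro h; cases h with
    | rel h => exact h
    | cons h => cases h
  · exact List.Lex.rel

theorem lt_sentinel (a : Char) (h : a ≤ 'z') : (([a] : List Char) < ['z', '1']) := by
  rcases lt_or_eq_of_le h with h | h
  · exact List.Lex.rel h
  · subst h; exact List.Lex.cons List.Lex.nil

theorem strLt_singleton (a b : Char) : PySem.Chars.strLt [a] [b] = decide (a < b) := by
  simp [PySem.Chars.strLt, lt_singleton_iff]

theorem strLt_sentinel (a : Char) (h : a ≤ 'z') : PySem.Chars.strLt [a] ['z', '1'] = true := by
  simp [PySem.Chars.strLt]; exact lt_sentinel a h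

theorem bCharAt_mem (w : List Char) (p : Int) (h0 : 0 ≤ p) (h1 : p < (w.length : Int)) :
    bCharAt w p ∈ w := by
  have hp : p = ((p.toNat : Nat) : Int) := (Int.toNat_of_nonneg h0).symm
  have hlt : p.toNat < w.length := by omega
  rw [bCharAt, hp, PySem.List.pyGet?_natCast, List.getElem?_eq_getElem hlt]
  exact List.getElem_mem hlt

theorem minFoldFrom_le (w : List Char) :
    ∀ (ps : List Int) (b : Char), minFoldFrom w b ps ≤ b := by
  intro ps
  induction ps with
  | nil => intro b; simp [minFoldFrom]
  | cons p pr ih =>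
    intro b
    rw [minFoldFrom]
    by_cases h : bCharAt w p < b
    · rw [if_pos h]; exact le_trans (ih _) (le_of_lt h)
    · rw [if_neg h]; exact ih b

theorem minFold_mem (w : List Char) (ps : List Int) (m : Char) (h : minFold w ps = some m) :
    ∃ p ∈ ps, bCharAt w p = m := by
  have key : ∀ (qs : List Int) (b : Char), minFoldFrom w b qs = b ∨ ∃ p ∈ qs, minFoldFrom w b qs = bCharAt w p := by
    intro qs
    induction qs with
    | nil => intro b; left; rfl
    | cons p pr ih =>
      intro b
      rcases ih (if bCharAt w p < b then bCharAt w p else b) with h' | ⟨q, hq, h'⟩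
      · by_cases hc : bCharAt w p < b
        · right; exact ⟨p, by simp, by simp only [minFoldFrom]; rw [h']; simp [hc]⟩
        · left; simp only [minFoldFrom]; rw [h']; simp [hc]
      · right; exact ⟨q, by simp [hq], by simp only [minFoldFrom]; rw [h']⟩
  cases ps with
  | nil => simp [minFold] at h
  | cons p pr =>
    simp only [minFold, Option.some.injEq] at h
    rcases key pr (bCharAt w p) with h' | ⟨q, hq, h'⟩
    · exact ⟨p, by simp, by rw [← h, h']⟩
    · exact ⟨q, by simp [hq], by rw [← h, h']⟩

theorem minFold_isMin (w : List Char) (ps : List Int) (m : Char) (h : minFold w ps = some m) :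
    ∀ p ∈ ps, m ≤ bCharAt w p := by
  have key : ∀ (qs : List Int) (b : Char), minFoldFrom w b qs ≤ b ∧ ∀ p ∈ qs, minFoldFrom w b qs ≤ bCharAt w p := by
    intro qs
    induction qs with
    | nil => intro b; exact ⟨le_refl b, by simp⟩
    | cons p pr ih =>
      intro b
      obtain ⟨hle, hall⟩ := ih (if bCharAt w p < b then bCharAt w p else b)
      constructor
      · exact minFoldFrom_le w (p :: pr) b
      · intro q hq
        rcases List.mem_cons.mp hq with rfl | hq'
        · simp only [minFoldFrom]
          refine le_trans hle ?_
          split_ifs with hc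
          · exact le_refl _
          · exact not_lt.mp hc
        · simpa only [minFoldFrom] using hall q hq'
  cases ps with
  | nil => simp [minFold] at h
  | cons p pr =>
    simp only [minFold, Option.some.injEq] at h
    intro q hq
    rcases List.mem_cons.mp hq with rfl | hq'
    · rw [← h]; exact minFoldFrom_le w pr (bCharAt w q)
    · rw [← h]; exact (key pr (bCharAt w p)).2 q hq'

theorem minFold_eq_none_iff (w : List Char) (ps : List Int) : minFold w ps = none ↔ ps = [] := by
  cases ps <;> simp [minFold]

-- same character set ⇒ same minimum
theorem min?_eq_minFold (ks : List Char) (w : List Char) (ps : List Int)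
    (hiff : ∀ c, c ∈ ks ↔ ∃ p ∈ ps, bCharAt w p = c) :
    PySem.List.min? ks (fun c => c) = minFold w ps := by
  cases hk : PySem.List.min? ks (fun c => c) with
  | none =>
    rw [PySem.List.min?_eq_none_iff] at hk
    cases hm : minFold w ps with
    | none => rfl
    | some m =>
      obtain ⟨p, hp, hcp⟩ := minFold_mem w ps m hm
      have : m ∈ ks := (hiff m).mpr ⟨p, hp, hcp⟩
      rw [hk] at this
      simp at this
  | some fc =>
    cases hm : minFold w ps with
    | none =>
      rw [minFold_eq_none_iff] at hm
      have hfc : fc ∈ ks := PySem.List.min?_mem hk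
      obtain ⟨p, hp, _⟩ := (hiff fc).mp hfc
      simp [hm] at hp
    | some m =>
      have hfc : fc ∈ ks := PySem.List.min?_mem hk
      obtain ⟨p, hp, hcp⟩ := (hiff fc).mp hfc
      have h1 : m ≤ fc := by rw [← hcp]; exact minFold_isMin w ps m hm p hp
      obtain ⟨q, hq, hcq⟩ := minFold_mem w ps m hm
      have hmk : m ∈ ks := (hiff m).mpr ⟨q, hq, hcq⟩
      have h2 : fc ≤ m := PySem.List.min?_isMin hk m hmk
      rw [le_antisymm h1 h2]

theorem bMinChar_eq (w : List Char) (ps : List Int) : bMinChar w ps = minFold w ps := by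
  refine min?_eq_minFold (ps.map (fun p => bCharAt w p)) w ps ?_
  intro c
  simp [List.mem_map]

theorem relC_lookup : ∀ (ch : AChildren) (w : List Char) (ps : List Int) (c : Char) (t : ATrie),
    RelC ch w ps → aChildLookup ch c = some t → RelT t w (bAdvance w ps c)
  | .nil, _, _, _, _ => by intro _ h; simp [aChildLookup] at h
  | .cons c0 t0 rest, w, ps, c, t => by
    intro hrc h
    obtain ⟨h1, h2⟩ := hrc
    by_cases hc : c0 = c
    · subst hc
      simp [aChildLookup] at h
      subst h
      exact h1
    · simp [aChildLookup, hc] at h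
      exact relC_lookup rest w ps c t h2 h

theorem lookup_of_mem : ∀ (ch : AChildren) (c : Char),
    c ∈ aChildKeys ch → ∃ t, aChildLookup ch c = some t
  | .nil, c => by simp [aChildKeys]
  | .cons c0 t0 rest, c => by
    intro h
    by_cases hc : c0 = c
    · exact ⟨t0, by simp [aChildLookup, hc]⟩
    · simp [aChildKeys, Ne.symm hc] at h
      obtain ⟨t, ht⟩ := lookup_of_mem rest c h
      exact ⟨t, by simp [aChildLookup, hc, ht]⟩

-- element found by the scans
def ElemGood (tries : List ATrie) (states : List (List Char × List Int × Option Char)) (c : Char) (off : Nat) : Prop :=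
  ∃ t s, tries[off]? = some t ∧ states[off]? = some s ∧ ItemRel t s ∧
    PySem.List.min? (aChildKeys (aChildren t)) (fun x => x) = some c

def ScanOut (tries : List ATrie) (states : List (List Char × List Int × Option Char))
    (P : Char → Int → Prop) (i0 : Int) (rA : List Char × Int) (rB : Option (Char × Int)) : Prop :=
  (rA = (['z', '1'], -1) ∧ rB = none) ∨
    (∃ c bi, rA = ([c], bi) ∧ rB = some (c, bi) ∧
      (P c bi ∨ ∃ off : Nat, bi = i0 + (off : Int) ∧ ElemGood tries states c off))

theorem scanOut_lift (t : ATrie) (s : List Char × List Int × Option Char) (tries : List ATrie)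
    (states : List (List Char × List Int × Option Char)) (P : Char → Int → Prop) (i0 : Int)
    (rA : List Char × Int) (rB : Option (Char × Int))
    (h : ScanOut tries states
      (fun c bi => P c bi ∨ (bi = i0 ∧ ElemGood (t :: tries) (s :: states) c 0))
      (i0 + 1) rA rB) :
    ScanOut (t :: tries) (s :: states) P i0 rA rB := by
  rcases h with ⟨hA, hB⟩ | ⟨c, bi, hA, hB, hprop⟩
  · exact Or.inl ⟨hA, hB⟩
  · refine Or.inr ⟨c, bi, hA, hB, ?_⟩
    rcases hprop with (hP | ⟨rfl, hEG⟩) | ⟨off, rfl, hEG⟩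
    · exact Or.inl hP
    · exact Or.inr ⟨0, by simp, hEG⟩
    · refine Or.inr ⟨off + 1, by push_cast; ring, ?_⟩
      obtain ⟨t', s', h1, h2, h3, h4⟩ := hEG
      exact ⟨t', s', by simpa using h1, by simpa using h2, h3, h4⟩

-- parallel scan correspondence
theorem scan_corr : ∀ (tries : List ATrie) (states : List (List Char × List Int × Option Char)),
    List.Forall₂ ItemRel tries states →
    ∀ (P : Char → Int → Prop) (i0 : Int) (minC : List Char) (best : Int)
      (accB : Option (Char × Int)),
    ((minC = ['z', '1'] ∧ best = -1 ∧ accB = none) ∨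
      (∃ c, minC = [c] ∧ accB = some (c, best) ∧ P c best)) →
    ScanOut tries states P i0 (aScan tries i0 minC best) (bScan states i0 accB) := by
  intro tries
  induction tries with
  | nil =>
    intro states h P i0 minC best accB hacc
    cases h
    simp only [aScan, bScan]
    rcases hacc with ⟨rfl, rfl, rfl⟩ | ⟨c, rfl, rfl, hP⟩
    · exact Or.inl ⟨rfl, rfl⟩
    · exact Or.inr ⟨c, best, rfl, rfl, Or.inl hP⟩
  | cons t tr ih =>
    intro states h P i0 minC best accB hacc
    cases h with
    | cons hab htail =>
      rename_i s st
      obtain ⟨w, ps, mc⟩ := s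
      obtain ⟨e, idx, ch⟩ := t
      obtain ⟨hrel, hzb, hmc⟩ := hab
      obtain ⟨hiff, hnd, hwf, hrc⟩ := hrel
      have hmc' : mc = minFold w ps := hmc
      clear hmc
      have hkeymin := min?_eq_minFold (aChildKeys ch) w ps hiff
      set P' : Char → Int → Prop := fun c bi => P c bi ∨
        (bi = i0 ∧ ElemGood (ATrie.mk e idx ch :: tr) ((w, ps, mc) :: st) c 0) with hP'
      have hmain : ∀ (minC' : List Char) (best' : Int) (accB' : Option (Char × Int)),
          ((minC' = ['z', '1'] ∧ best' = -1 ∧ accB' = none) ∨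
            (∃ c, minC' = [c] ∧ accB' = some (c, best') ∧ P' c best')) →
          ScanOut (ATrie.mk e idx ch :: tr) ((w, ps, mc) :: st) P i0
            (aScan tr (i0 + 1) minC' best') (bScan st (i0 + 1) accB') := by
        intro minC' best' accB' hacc'
        exact scanOut_lift _ _ _ _ _ _ _ _ (ih st htail P' (i0 + 1) minC' best' accB' hacc')
      simp only [aScan, bScan, aChildren]
      cases hm : minFold w ps with
      | none =>
        rw [hm] at hmc'
        subst hmc'
        simp only [hkeymin, hm]
        refine hmain minC best accB ?_
        rcases hacc with ⟨h1, h2, h3⟩ | ⟨c, h1, h3, hP⟩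
        · exact Or.inl ⟨h1, h2, h3⟩
        · exact Or.inr ⟨c, h1, h3, Or.inl hP⟩
      | some m =>
        rw [hm] at hmc'
        subst hmc'
        have hmz : m ≤ 'z' := by
          obtain ⟨p, hp, hcp⟩ := minFold_mem w ps m hm
          obtain ⟨h0, h1⟩ := hwf p hp
          exact hcp ▸ hzb _ (bCharAt_mem w p h0 h1)
        have hEG0 : ElemGood (ATrie.mk e idx ch :: tr) ((w, ps, some m) :: st) m 0 :=
          ⟨ATrie.mk e idx ch, (w, ps, some m), rfl, rfl,
            ⟨⟨hiff, hnd, hwf, hrc⟩, hzb, hm.symm⟩, by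
              simp only [aChildren]; rw [hkeymin, hm]⟩
        rcases hacc with ⟨rfl, rfl, rfl⟩ | ⟨c, rfl, rfl, hP⟩
        · simp only [hkeymin, hm, strLt_sentinel m hmz, if_true]
          exact hmain [m] i0 (some (m, i0))
            (Or.inr ⟨m, rfl, rfl, Or.inr ⟨rfl, hEG0⟩⟩)
        · simp only [hkeymin, hm, strLt_singleton, decide_eq_true_eq]
          by_cases hlt : m < c
          · simp only [if_pos hlt]
            exact hmain [m] i0 (some (m, i0))
              (Or.inr ⟨m, rfl, rfl, Or.inr ⟨rfl, hEG0⟩⟩)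
          · simp only [if_neg hlt]
            exact hmain [c] best (some (c, best))
              (Or.inr ⟨c, rfl, rfl, Or.inl hP⟩)

theorem forall₂_set {α β : Type} {R : α → β → Prop} :
    ∀ (l₁ : List α) (l₂ : List β) (n : Nat) (a : α) (b : β),
    List.Forall₂ R l₁ l₂ → R a b → List.Forall₂ R (l₁.set n a) (l₂.set n b) := by
  intro l₁
  induction l₁ with
  | nil => intro l₂ n a b h _; cases h; simpa using h
  | cons x xs ih =>
    intro l₂ n a b h hab
    cases h with
    | cons hxy htail =>
      rename_i y ys
      cases n with
      | zero => exact List.Forall₂.cons hab htail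
      | succ n => exact List.Forall₂.cons hxy (ih ys n a b htail hab)

-- the two loops agree on related states
theorem loop_eq : ∀ (fuel : Nat) (tries : List ATrie) (states : List (List Char × List Int × Option Char))
    (acc : List Char), List.Forall₂ ItemRel tries states →
    aLoop fuel tries acc = bLoop fuel states acc := by
  intro fuel
  induction fuel with
  | zero => intro tries states acc _; rfl
  | succ fuel ih =>
    intro tries states acc h
    by_cases hemp : tries = []
    · subst hemp
      cases h
      rfl
    · have hempB : states ≠ [] := by
        intro hs
        subst hs
        cases h
        exact hemp rfl
      have hso := scan_corr tries states h (fun _ _ => False) 0 ['z', '1'] (-1) none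
        (Or.inl ⟨rfl, rfl, rfl⟩)
      rcases hso with ⟨hA, hB⟩ | ⟨c, bi, hA, hB, hprop⟩
      · simp only [aLoop, bLoop, List.isEmpty_iff, hemp, hempB, if_false, hA, hB]
        simp
      · rcases hprop with hF | ⟨off, hbi, hEG⟩
        · exact absurd hF not_false
        · obtain ⟨t, s, hts, hss, hitem, hmin⟩ := hEG
          obtain ⟨w, ps, mc⟩ := s
          have hbi0 : (0:Int) ≤ bi := by omega
          have hbin : bi.toNat = off := by omega
          have hbne : ¬ (bi = -1) := by omega
          have hc : c ∈ aChildKeys (aChildren t) := PySem.List.min?_mem hmin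
          obtain ⟨t', hlook⟩ := lookup_of_mem _ c hc
          obtain ⟨e, idx, ch⟩ := t
          obtain ⟨hrel, hzb, hmc⟩ := hitem
          obtain ⟨hiff, hnd, hwf, hrc⟩ := hrel
          have hrelt' : RelT t' w (bAdvance w ps c) :=
            relC_lookup ch w ps c t' hrc (by simpa [aChildren] using hlook)
          have hgetA : tries.getD bi.toNat (ATrie.mk false [] .nil) = ATrie.mk e idx ch := by
            rw [List.getD_eq_getElem?_getD, hbin, hts]; rfl
          have hgetB : states.getD bi.toNat ([], [], none) = (w, ps, mc) := by
            rw [List.getD_eq_getElem?_getD, hbin, hss]; rfl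
          have hnext : List.Forall₂ ItemRel (tries.set bi.toNat t')
              (states.set bi.toNat (w, bAdvance w ps c, bMinChar w (bAdvance w ps c))) :=
            forall₂_set tries states bi.toNat t'
              (w, bAdvance w ps c, bMinChar w (bAdvance w ps c)) h
              ⟨hrelt', hzb, bMinChar_eq w (bAdvance w ps c)⟩
          simp only [aLoop, bLoop, List.isEmpty_iff, hemp, hempB, if_false, hA, hB]
          simp only [hbne, if_false, hgetA, hgetB]
          have hstep : (aChildLookup ch c).getD (ATrie.mk false [] AChildren.nil) = t' := by
            rw [show aChildLookup ch c = some t' from hlook]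
            rfl
          simp only [aChildren, hstep]
          exact ih _ _ _ hnext

-- bAdvance over an extended position list
theorem bAdvance_append (w : List Char) (P : List Int) (j : Int) (c : Char) :
    bAdvance w (P ++ [j]) c =
      bAdvance w P c ++ (if bCharAt w j = c ∧ j + 1 < (w.length : Int) then [j + 1] else []) := by
  by_cases h1 : bCharAt w j = c
  · by_cases h2 : j + 1 < (w.length : Int)
    · simp [bAdvance, List.filter_append, h1, h2]
    · simp [bAdvance, List.filter_append, h1, h2]
  · simp [bAdvance, List.filter_append, h1]

theorem keys_setChild : ∀ (ch : AChildren) (c : Char) (t : ATrie),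
    aChildKeys (aSetChild ch c t) =
      if c ∈ aChildKeys ch then aChildKeys ch else aChildKeys ch ++ [c]
  | .nil, c, t => by simp [aSetChild, aChildKeys]
  | .cons c0 t0 rest, c, t => by
    by_cases hc : c0 = c
    · subst hc
      simp [aSetChild, aChildKeys]
    · simp only [aSetChild, if_neg hc, aChildKeys, keys_setChild rest c t]
      by_cases hmem : c ∈ aChildKeys rest
      · simp [hmem, Ne.symm hc]
      · simp [hmem, Ne.symm hc]

theorem relC_mono : ∀ (ch : AChildren) (w : List Char) (ps ps' : List Int),
    RelC ch w ps → (∀ c ∈ aChildKeys ch, bAdvance w ps' c = bAdvance w ps c) →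
    RelC ch w ps'
  | .nil, _, _, _ => by intro _ _; trivial
  | .cons c0 t0 rest, w, ps, ps' => by
    intro hrc heq
    obtain ⟨h1, h2⟩ := hrc
    refine ⟨?_, relC_mono rest w ps ps' h2 (fun c hc => heq c (by simp [aChildKeys, hc]))⟩
    rw [heq c0 (by simp [aChildKeys])]
    exact h1

theorem relC_setChild : ∀ (ch : AChildren) (w : List Char) (ps ps' : List Int) (c : Char)
    (tNew : ATrie),
    (aChildKeys ch).Nodup → RelC ch w ps →
    RelT tNew w (bAdvance w ps' c) →
    (∀ c', c' ≠ c → bAdvance w ps' c' = bAdvance w ps c') →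
    RelC (aSetChild ch c tNew) w ps'
  | .nil, w, ps, ps', c, tNew => by
    intro _ _ hNew _
    exact ⟨hNew, trivial⟩
  | .cons c0 t0 rest, w, ps, ps', c, tNew => by
    intro hnd hrc hNew hkeep
    obtain ⟨h1, h2⟩ := hrc
    simp only [aChildKeys, List.nodup_cons] at hnd
    by_cases hc : c0 = c
    · subst hc
      simp only [aSetChild, if_pos rfl]
      refine ⟨hNew, ?_⟩
      exact relC_mono rest w ps ps' h2 (fun c' hc' => hkeep c' (fun hne => hnd.1 (hne ▸ hc')))
    · simp only [aSetChild, if_neg hc]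
      refine ⟨?_, relC_setChild rest w ps ps' c tNew hnd.2 h2 hNew hkeep⟩
      rw [hkeep c0 hc]
      exact h1

theorem mem_keys_setChild (ch : AChildren) (c : Char) (t : ATrie) (c' : Char) :
    c' ∈ aChildKeys (aSetChild ch c t) ↔ c' = c ∨ c' ∈ aChildKeys ch := by
  rw [keys_setChild]
  split_ifs with h
  · constructor
    · exact Or.inr
    · rintro (rfl | h') <;> [exact h; exact h']
  · simp [or_comm]

theorem relT_empty (w : List Char) : RelT (ATrie.mk false [] .nil) w [] :=
  ⟨by simp [aChildKeys], List.nodup_nil, by simp [wfPos], trivial⟩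

theorem relT_aAppendIndex (w : List Char) (ps : List Int) (t : ATrie) (i' : Int)
    (h : RelT t w ps) : RelT (aAppendIndex t i') w ps := by
  obtain ⟨e, ix, ch⟩ := t
  exact h

theorem relT_setEnd (w : List Char) (t : ATrie) (P : List Int) (i' : Int)
    (h : RelT t w P) : RelT (aInsertSuffix t [] i') w P := by
  obtain ⟨e, idx, ch⟩ := t
  exact h

theorem lookup_none_not_mem (ch : AChildren) (c : Char)
    (h : aChildLookup ch c = none) : c ∉ aChildKeys ch := by
  intro hc
  obtain ⟨t, ht⟩ := lookup_of_mem ch c hc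
  rw [h] at ht
  cases ht

-- insertion of the suffix w[j:] preserves the invariant, adding position j
theorem relT_insertSuffix (w : List Char) :
    ∀ (n : Nat) (j : Nat) (t : ATrie) (P : List Int) (i' : Int),
    w.length - j = n → j < w.length → RelT t w P →
    RelT (aInsertSuffix t (w.drop j) i') w (P ++ [(j : Int)]) := by
  intro n
  induction n with
  | zero => intro j t P i' hn hj _; omega
  | succ n ihn =>
    intro j t P i' hn hj hrel
    obtain ⟨e, idx, ch⟩ := t
    obtain ⟨hiff, hnd, hwf, hrc⟩ := hrel
    have hdrop : w.drop j = w[j] :: w.drop (j + 1) := List.drop_eq_getElem_cons hj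
    have hcharj : bCharAt w ((j : Nat) : Int) = w[j] := by
      rw [bCharAt, PySem.List.pyGet?_natCast, List.getElem?_eq_getElem hj]; rfl
    rw [hdrop]
    simp only [aInsertSuffix]
    -- the child node before the recursive insertion (children unchanged by index append)
    have hchild1 : RelT (aAppendIndex ((aChildLookup ch w[j]).getD (ATrie.mk false [] .nil)) i')
        w (bAdvance w P w[j]) := by
      refine relT_aAppendIndex w _ _ i' ?_
      cases hlk : aChildLookup ch w[j] with
      | some t0 =>
        rw [Option.getD_some]
        exact relC_lookup ch w P w[j] t0 hrc hlk
      | none =>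
        have hnm := lookup_none_not_mem ch w[j] hlk
        have hQnil : bAdvance w P w[j] = [] := by
          have hno : ∀ p ∈ P, ¬ (bCharAt w p = w[j]) := by
            intro p hp hcp
            exact hnm ((hiff w[j]).mpr ⟨p, hp, hcp⟩)
          simp only [bAdvance, List.map_eq_nil_iff, List.filter_eq_nil_iff]
          intro p hp
          simp [hno p hp]
        rw [Option.getD_none, hQnil]
        exact relT_empty w
    -- the recursively inserted child
    have hchild2 : RelT (aInsertSuffix (aAppendIndex ((aChildLookup ch w[j]).getD
          (ATrie.mk false [] .nil)) i') (w.drop (j + 1)) i') w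
        (bAdvance w (P ++ [(j : Int)]) w[j]) := by
      rw [bAdvance_append, hcharj]
      by_cases hlt : j + 1 < w.length
      · rw [if_pos ⟨rfl, by exact_mod_cast hlt⟩]
        have := ihn (j + 1) _ (bAdvance w P w[j]) i' (by omega) hlt hchild1
        simpa using this
      · rw [if_neg (by push_cast; omega)]
        rw [List.drop_eq_nil_of_le (by omega), List.append_nil]
        exact relT_setEnd w _ _ i' hchild1
    refine ⟨?_, ?_, ?_, ?_⟩
    · -- keyset
      intro c'
      rw [mem_keys_setChild]
      constructor
      · rintro (rfl | hk)
        · exact ⟨(j : Int), by simp, hcharj⟩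
        · obtain ⟨p, hp, hcp⟩ := (hiff c').mp hk
          exact ⟨p, by simp [hp], hcp⟩
      · rintro ⟨p, hp, hcp⟩
        rcases List.mem_append.mp hp with hp' | hp'
        · exact Or.inr ((hiff c').mpr ⟨p, hp', hcp⟩)
        · left
          have : p = ((j : Nat) : Int) := by simpa using hp'
          rw [← hcp, this, hcharj]
    · -- nodup
      rw [keys_setChild]
      split_ifs with h
      · exact hnd
      · simp only [List.nodup_append, List.nodup_singleton, true_and]
        refine ⟨hnd, ?_⟩
        intro a ha b hb
        simp only [List.mem_singleton] at hb
        subst hb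
        exact fun heq => h (heq ▸ ha)
    · -- wf
      intro p hp
      rcases List.mem_append.mp hp with hp' | hp'
      · exact hwf p hp'
      · have : p = ((j : Nat) : Int) := by simpa using hp'
        subst this
        constructor <;> [positivity; exact_mod_cast hj]
    · -- children
      refine relC_setChild ch w P (P ++ [(j : Int)]) w[j] _ hnd hrc hchild2 ?_
      intro c' hne
      rw [bAdvance_append, hcharj, if_neg (by rintro ⟨h', _⟩; exact hne h'.symm), List.append_nil]

theorem relT_build (w : String) (hw : ∀ c ∈ w.toList, c ≤ 'z') :
    ItemRel (aBuild w) (w.toList, PySem.List.pyRange 0 (PySem.Str.len w),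
      bMinChar w.toList (PySem.List.pyRange 0 (PySem.Str.len w))) := by
  refine ⟨?_, hw, bMinChar_eq w.toList (PySem.List.pyRange 0 (PySem.Str.len w))⟩
  have hlen : PySem.Str.len w = ((w.toList.length : Nat) : Int) := by
    simp [PySem.Str.len_eq]
  show RelT (aBuild w) w.toList (PySem.List.pyRange 0 (PySem.Str.len w))
  unfold aBuild
  rw [hlen, PySem.List.pyRange_zero_natCast, List.foldl_map]
  have key : ∀ m : Nat, m ≤ w.toList.length →
      RelT ((List.range m).foldl
          (fun root (jj : Nat) => aInsertSuffix root (w.toList.drop (((jj : Nat) : Int)).toNat) (((jj : Nat) : Int)))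
          (ATrie.mk false [] .nil))
        w.toList ((List.range m).map (fun i : Nat => ((i : Nat) : Int))) := by
    intro m
    induction m with
    | zero => intro _; simpa using relT_empty w.toList
    | succ m ihm =>
      intro hm
      rw [List.range_succ, List.foldl_append, List.map_append]
      simp only [List.foldl_cons, List.foldl_nil, List.map_cons, List.map_nil]
      have h1 := relT_insertSuffix w.toList (w.toList.length - m) m _
        ((List.range m).map (fun i : Nat => ((i : Nat) : Int))) ((m : Int)) (by omega) (by omega)
        (ihm (by omega))
      simpa using h1
  exact key w.toList.length le_rfl

theorem items_init (words : List String)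
    (hpre : ∀ w ∈ words, ∀ c ∈ w.toList, c ≤ 'z') :
    List.Forall₂ ItemRel (words.map aBuild)
      (words.map (fun w => (w.toList, PySem.List.pyRange 0 (PySem.Str.len w),
        bMinChar w.toList (PySem.List.pyRange 0 (PySem.Str.len w))))) := by
  induction words with
  | nil => exact List.Forall₂.nil
  | cons w ws ih =>
    exact List.Forall₂.cons (relT_build w (hpre w (by simp)))
      (ih (fun w' hw' => hpre w' (by simp [hw'])))

-- ===== VERDICT (by name: the statement is the Claim_ definition above) =====
theorem lexicographically_smallest_string_spec : Claim_equal_lexicographically_smallest_string := by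
  intro words k _hdom hpre
  have hpre' : ∀ w ∈ words, ∀ c ∈ w.toList, c ≤ 'z' := by
    simpa [Pre_lexicographically_smallest_string, List.all_eq_true] using hpre
  unfold Spec_lexicographically_smallest_string
  unfold lexicographically_smallest_string lexicographically_smallest_string_alt
  exact congrArg String.mk (loop_eq k.toNat _ _ [] (items_init words hpre'))
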